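-- pv_equiv track=rewrite | github.com/nhsengland/privfp-experiments | src/config/experimental_config_handler.py | correct_overrides_model_serving_type
-- ===== SOURCE A (Python) =====
-- import copy
-- from typing import List, Tuple, Any, Dict, Union
--
-- def correct_overrides_model_serving_type(
--     total_overrides: List[dict],
-- ) -> List[dict]:
--     """Function to correct for instances where you want to try various model_serving types with different values, but don't want complete iteration being copied.
--
--     Args:
--         total_overrides (List[dict]): List of total overrides you want to overwrite.
--
--     Returns:
--         List[dict]: Returns a list of ovverrides where None has been forced for some specific serving model vqriables.
--     """
--     configurations = copy.deepcopy(total_overrides)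
--     for config in configurations:
--         if "extraction.server_model_type" in config.keys():
--             if config["extraction.server_model_type"] != "gliner":
--                 config["extraction.gliner_features.gliner_model"] = None
--             if config["extraction.server_model_type"] != "ollama":
--                 config["extraction.ollama_features.ollama_ner_model"] = None
--                 config["extraction.ollama_features.prompt_template_path"] = (
--                     None
--                 )
--             if config["extraction.server_model_type"] != "local":
--                 config["extraction.local_features.hf_repo_id"] = None
--                 config["extraction.local_features.hf_filename"] = None
--                 config["extraction.local_features.prompt_template_path"] = None
--
--     return configurations
-- ===== SOURCE B (Python) =====
-- import copy
--
-- _NULL_ORDER = [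
--     ("gliner", "extraction.gliner_features.gliner_model"),
--     ("ollama", "extraction.ollama_features.ollama_ner_model"),
--     ("ollama", "extraction.ollama_features.prompt_template_path"),
--     ("local", "extraction.local_features.hf_repo_id"),
--     ("local", "extraction.local_features.hf_filename"),
--     ("local", "extraction.local_features.prompt_template_path"),
-- ]
--
--
-- def correct_overrides_model_serving_type(total_overrides):
--     result = []
--     for config in total_overrides:
--         if "extraction.server_model_type" not in config:
--             result.append(copy.deepcopy(config))
--             continue
--         t = config["extraction.server_model_type"]
--         nulled = {k for typ, k in _NULL_ORDER if typ != t}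
--         new = {k: (None if k in nulled else copy.deepcopy(v))
--                for k, v in config.items()}
--         for typ, k in _NULL_ORDER:
--             if typ != t and k not in new:
--                 new[k] = None
--         result.append(new)
--     return result
-- ===== Notes on version B (the rewrite author's own statement) =====
-- stated objective: alternative
-- what changed: B rebuilds each config functionally (a pure per-key comprehension over its items deciding null-vs-keep via a precomputed set of forced keys, then appending the missing forced keys) instead of A's deepcopy-then-mutate chain of hardcoded conditional in-place assignments.
import Mathlib
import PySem

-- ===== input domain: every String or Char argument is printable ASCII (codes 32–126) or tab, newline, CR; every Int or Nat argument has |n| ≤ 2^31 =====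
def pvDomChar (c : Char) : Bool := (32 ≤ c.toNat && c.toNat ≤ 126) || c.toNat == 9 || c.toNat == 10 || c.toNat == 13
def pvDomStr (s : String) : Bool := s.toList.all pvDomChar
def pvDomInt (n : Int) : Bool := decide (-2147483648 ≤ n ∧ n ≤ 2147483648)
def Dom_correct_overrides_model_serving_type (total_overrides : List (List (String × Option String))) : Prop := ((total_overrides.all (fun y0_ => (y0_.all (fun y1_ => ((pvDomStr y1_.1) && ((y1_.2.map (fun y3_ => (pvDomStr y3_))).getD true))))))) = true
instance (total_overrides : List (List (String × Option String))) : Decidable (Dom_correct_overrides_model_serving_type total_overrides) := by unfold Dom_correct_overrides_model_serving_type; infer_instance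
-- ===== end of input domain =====

-- B rebuilds each config non-destructively (one comprehension over its items + appending the missing forced keys) instead of A's deepcopy-and-mutate insert chain; return values proved equal (A only mutates its own deepcopy).

-- ===== PORT A =====
-- the body of A's for-loop, on one config dict: sequential in-place inserts
def pvFixA (c : PySem.Dict String (Option String)) : PySem.Dict String (Option String) :=
  if c.contains "extraction.server_model_type" then
    let t := c.getD "extraction.server_model_type" none
    let c := if t ≠ some "gliner" then c.insert "extraction.gliner_features.gliner_model" none else c
    let c := if t ≠ some "ollama" then
               (c.insert "extraction.ollama_features.ollama_ner_model" none).insert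
                 "extraction.ollama_features.prompt_template_path" none
             else c
    let c := if t ≠ some "local" then
               ((c.insert "extraction.local_features.hf_repo_id" none).insert
                 "extraction.local_features.hf_filename" none).insert
                 "extraction.local_features.prompt_template_path" none
             else c
    c
  else c

def correct_overrides_model_serving_type (total_overrides : List (List (String × Option String))) : List (List (String × Option String)) :=
  total_overrides.map (fun config => (pvFixA (PySem.Dict.ofList config)).items)

-- ===== PORT B =====
def pvNullOrder : List (String × String) :=
  [("gliner", "extraction.gliner_features.gliner_model"),
   ("ollama", "extraction.ollama_features.ollama_ner_model"),
   ("ollama", "extraction.ollama_features.prompt_template_path"),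
   ("local", "extraction.local_features.hf_repo_id"),
   ("local", "extraction.local_features.hf_filename"),
   ("local", "extraction.local_features.prompt_template_path")]

-- Source B's loop body: rebuild the config (comprehension + append missing), no mutation of the input
def pvRebuild (config : List (String × Option String)) : List (String × Option String) :=
  let d := PySem.Dict.ofList config
  if d.contains "extraction.server_model_type" then
    let t := d.getD "extraction.server_model_type" none
    let nulled : PySem.Set String :=
      PySem.Set.ofList ((pvNullOrder.filter (fun q => some q.1 ≠ t)).map (·.2))
    let m := PySem.Dict.ofList
      (d.items.map (fun p => (p.1, if nulled.contains p.1 then none else p.2)))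
    (pvNullOrder.foldl
      (fun a q => if some q.1 ≠ t ∧ ¬ a.contains q.2 then a.insert q.2 none else a) m).items
  else d.items

def correct_overrides_model_serving_type_alt (total_overrides : List (List (String × Option String))) : List (List (String × Option String)) :=
  total_overrides.foldl (fun acc config => acc ++ [pvRebuild config]) []

-- ===== PRECONDITION & SPEC =====
def Spec_correct_overrides_model_serving_type (total_overrides : List (List (String × Option String))) (out : List (List (String × Option String))) : Prop := out = correct_overrides_model_serving_type_alt total_overrides
instance (total_overrides : List (List (String × Option String))) (out : List (List (String × Option String))) : Decidable (Spec_correct_overrides_model_serving_type total_overrides out) := by unfold Spec_correct_overrides_model_serving_type; infer_instance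

-- ===== CLAIM =====
def Claim_equal_correct_overrides_model_serving_type : Prop := ∀ (total_overrides : List (List (String × Option String))), Dom_correct_overrides_model_serving_type total_overrides → Spec_correct_overrides_model_serving_type total_overrides (correct_overrides_model_serving_type total_overrides)

-- ===== LEMMAS AND PROOFS =====

-- an unconditional insert-none chain over distinct keys = one override-map plus appended missing keys
theorem pv_chain_eq (ks : List String) (d : PySem.Dict String (Option String)) (hnd : ks.Nodup) :
    ks.foldl (fun a k => a.insert k (none : Option String)) d
      = PySem.Dict.mk
          (d.items.map (fun p => if ks.contains p.1 then (p.1, (none : Option String)) else p)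
            ++ (ks.filter (fun k => !d.contains k)).map (fun k => (k, (none : Option String)))) := by
  induction ks generalizing d with
  | nil => simp
  | cons k ks ih =>
    have hk : k ∉ ks := (List.nodup_cons.mp hnd).1
    have hks : ks.Nodup := (List.nodup_cons.mp hnd).2
    rw [List.foldl_cons, ih _ hks]
    by_cases h : d.contains k = true
    · rw [PySem.Dict.items_insert_of_contains _ _ h]
      have h1 : ((d.items.map fun p => if (p.1 == k) = true then (k, (none : Option String)) else p).map
            fun p => if ks.contains p.1 then (p.1, (none : Option String)) else p)
          = d.items.map fun p => if (k :: ks).contains p.1 then (p.1, (none : Option String)) else p := by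
        rw [List.map_map]
        apply List.map_congr_left
        intro p _
        by_cases hp : p.1 = k
        · simp [hp, hk]
        · simp [hp]
      have h2 : ((k :: ks).filter fun k' => !d.contains k') = ks.filter fun k' => !d.contains k' := by
        rw [List.filter_cons]; simp [h]
      have h3 : (ks.filter fun k' => !(d.insert k none).contains k')
          = ks.filter fun k' => !d.contains k' := by
        apply List.filter_congr
        intro x hx
        rw [PySem.Dict.contains_insert]
        have : x ≠ k := fun he => hk (he ▸ hx)
        simp [this]
      rw [h1, h3, h2]
    · have hcf : d.contains k = false := by simpa using h
      rw [PySem.Dict.items_insert_of_not_contains _ _ hcf, List.map_append]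
      have h1 : (d.items.map fun p => if ks.contains p.1 then (p.1, (none : Option String)) else p)
          = d.items.map fun p => if (k :: ks).contains p.1 then (p.1, (none : Option String)) else p := by
        apply List.map_congr_left
        intro p hp
        have hne : p.1 ≠ k := by
          intro he
          have : d.contains k = true := by
            simp only [PySem.Dict.contains, List.any_eq_true]
            exact ⟨p, hp, by simp [he]⟩
          simp [this] at hcf
        simp [hne]
      have h2 : ([(k, (none : Option String))].map fun p => if ks.contains p.1 then (p.1, (none : Option String)) else p)
          = [(k, (none : Option String))] := by
        simp only [List.map_cons, List.map_nil]
        by_cases hkk : ks.contains k <;> simp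
      have h3 : (ks.filter fun k' => !(d.insert k none).contains k')
          = ks.filter fun k' => !d.contains k' := by
        apply List.filter_congr
        intro x hx
        rw [PySem.Dict.contains_insert]
        have : x ≠ k := fun he => hk (he ▸ hx)
        simp [this]
      rw [h1, h2, h3, List.filter_cons]
      simp [hcf, List.append_assoc]

-- Source B's second loop (insert only if type differs and key absent) over pairwise-distinct keys
theorem pv_cond_chain_eq (qs : List (String × String)) (t : Option String)
    (m : PySem.Dict String (Option String)) (hnd : (qs.map (·.2)).Nodup) :
    qs.foldl (fun a q => if some q.1 ≠ t ∧ ¬ a.contains q.2 then a.insert q.2 (none : Option String) else a) m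
      = PySem.Dict.mk
          (m.items ++ (qs.filter (fun q => some q.1 ≠ t && !m.contains q.2)).map
            (fun q => (q.2, (none : Option String)))) := by
  induction qs generalizing m with
  | nil => simp
  | cons q qs ih =>
    have hk : q.2 ∉ qs.map (·.2) := (List.nodup_cons.mp hnd).1
    have hqs : (qs.map (·.2)).Nodup := (List.nodup_cons.mp hnd).2
    rw [List.foldl_cons]
    by_cases ht : some q.1 ≠ t
    · by_cases hc : m.contains q.2 = true
      · rw [if_neg (by simp [hc]), ih _ hqs, List.filter_cons]
        simp [ht, hc]
      · rw [if_pos ⟨ht, by simp [hc]⟩, ih _ hqs, List.filter_cons]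
        have hcf : m.contains q.2 = false := by simpa using hc
        rw [PySem.Dict.items_insert_of_not_contains _ _ hcf]
        have h3 : (qs.filter fun q' => some q'.1 ≠ t && !(m.insert q.2 none).contains q'.2)
            = qs.filter fun q' => some q'.1 ≠ t && !m.contains q'.2 := by
          apply List.filter_congr
          intro x hx
          rw [PySem.Dict.contains_insert]
          have hne : x.2 ≠ q.2 := fun he => hk (he ▸ List.mem_map_of_mem hx)
          have hb : (x.2 == q.2) = false := beq_eq_false_iff_ne.mpr hne
          simp [hb]
        rw [h3]
        simp [ht, hcf, List.append_assoc]
    · rw [if_neg (by simp [ht]), ih _ hqs, List.filter_cons]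
      simp [ht]

-- a dict literal with distinct keys: ofList is the identity on items
theorem pv_items_ofList (l : List (String × Option String)) (hnd : (l.map (·.1)).Nodup) :
    (PySem.Dict.ofList l).items = l := by
  have := PySem.Dict.items_foldl_insert_fresh (l := l) (k := Prod.fst) (v := Prod.snd)
    (d := PySem.Dict.empty) (by intro a _; simp) (by simpa using hnd)
  simpa [PySem.Dict.ofList, PySem.Dict.update] using this

theorem pv_core (t : Option String) (d : PySem.Dict String (Option String)) (hnd : d.keys.Nodup) :
    (let c1 := if t ≠ some "gliner" then d.insert "extraction.gliner_features.gliner_model" (none : Option String) else d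
     let c2 := if t ≠ some "ollama" then (c1.insert "extraction.ollama_features.ollama_ner_model" none).insert "extraction.ollama_features.prompt_template_path" none else c1
     let c3 := if t ≠ some "local" then ((c2.insert "extraction.local_features.hf_repo_id" none).insert "extraction.local_features.hf_filename" none).insert "extraction.local_features.prompt_template_path" none else c2
     c3).items
    = (let nulled : PySem.Set String :=
         PySem.Set.ofList ((pvNullOrder.filter (fun q => some q.1 ≠ t)).map (·.2))
       let m := PySem.Dict.ofList
         (d.items.map (fun p => (p.1, if nulled.contains p.1 then none else p.2)))
       (pvNullOrder.foldl
         (fun a q => if some q.1 ≠ t ∧ ¬ a.contains q.2 then a.insert q.2 none else a) m).items) := by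
  have hnd6 : (pvNullOrder.map (·.2)).Nodup := by decide
  have hndk : ((pvNullOrder.filter (fun q => some q.1 ≠ t)).map (·.2)).Nodup :=
    hnd6.sublist ((pvNullOrder.filter_sublist).map _)
  have hA : (let c1 := if t ≠ some "gliner" then d.insert "extraction.gliner_features.gliner_model" (none : Option String) else d
     let c2 := if t ≠ some "ollama" then (c1.insert "extraction.ollama_features.ollama_ner_model" none).insert "extraction.ollama_features.prompt_template_path" none else c1
     let c3 := if t ≠ some "local" then ((c2.insert "extraction.local_features.hf_repo_id" none).insert "extraction.local_features.hf_filename" none).insert "extraction.local_features.prompt_template_path" none else c2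
     c3)
      = ((pvNullOrder.filter (fun q => some q.1 ≠ t)).map (·.2)).foldl
          (fun a k => a.insert k (none : Option String)) d := by
    by_cases h1 : t = some "gliner" <;> by_cases h2 : t = some "ollama" <;>
      by_cases h3 : t = some "local" <;> simp_all [pvNullOrder, eq_comm]
  rw [hA, pv_chain_eq _ _ hndk]
  have hm : (PySem.Dict.ofList
      (d.items.map (fun p => (p.1, if (PySem.Set.ofList ((pvNullOrder.filter (fun q => some q.1 ≠ t)).map (·.2))).contains p.1 then none else p.2)))).items
      = d.items.map (fun p => (p.1, if (PySem.Set.ofList ((pvNullOrder.filter (fun q => some q.1 ≠ t)).map (·.2))).contains p.1 then none else p.2)) := by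
    apply pv_items_ofList
    simpa [List.map_map, Function.comp_def] using hnd
  simp only [pv_cond_chain_eq _ _ _ hnd6, hm]
  congr 1
  · -- the override map: membership in the key list = membership in the set
    apply List.map_congr_left
    intro p _
    simp only [ne_eq]
    by_cases hp : p.1 ∈ (pvNullOrder.filter (fun q => !decide (some q.1 = t))).map (·.2)
    · simp [PySem.Set.mem_ofList, hp]
    · simp [PySem.Set.mem_ofList, hp]
  · -- the appended missing keys: filter-of-map = map-of-filter, contains unchanged by the rebuild
    have hcont : ∀ k, (PySem.Dict.ofList
        (d.items.map (fun p => (p.1, if (PySem.Set.ofList ((pvNullOrder.filter (fun q => some q.1 ≠ t)).map (·.2))).contains p.1 then none else p.2)))).contains k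
        = d.contains k := by
      intro k
      simp only [PySem.Dict.contains, hm, List.any_map, Function.comp_def]
    simp only [ne_eq] at hcont ⊢
    simp only [hcont]
    rw [List.filter_map, List.filter_filter, List.map_map]
    simp only [Function.comp_def]
    congr 1
    apply List.filter_congr
    intro q _
    exact Bool.and_comm _ _

theorem pv_fix_eq (config : List (String × Option String)) :
    (pvFixA (PySem.Dict.ofList config)).items = pvRebuild config := by
  unfold pvFixA pvRebuild
  by_cases hc : (PySem.Dict.ofList config).contains "extraction.server_model_type" = true
  · rw [if_pos hc, if_pos hc]
    exact pv_core _ _ (PySem.Dict.nodup_keys_ofList config)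
  · rw [if_neg hc, if_neg hc]

-- ===== VERDICT =====
theorem pv_map_eq_flatMap_singleton {α β : Type} (l : List α) (f : α → β) :
    l.map f = l.flatMap (fun x => [f x]) := by
  induction l with
  | nil => rfl
  | cons a l ih => simp [ih]

theorem correct_overrides_model_serving_type_spec : Claim_equal_correct_overrides_model_serving_type := by
  intro total_overrides _
  unfold Spec_correct_overrides_model_serving_type correct_overrides_model_serving_type correct_overrides_model_serving_type_alt
  rw [PySem.List.foldl_append_eq_flatMap, ← pv_map_eq_flatMap_singleton]
  simp [pv_fix_eq]
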